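-- pv_equiv track=rewrite | github.com/S1LV3RJ1NX/CodingNinjas-DSA | 04 - MultiDimensional Arrays/03 - flip_matrix.py | countFlip
-- ===== SOURCE A (Python) =====
-- def countFlip(mat):
--     # Write your code here.
--     n = len(mat)
--
--     visited_row = [False for x in range(n)]
--     visited_col = [False for x in range(n)]
--     # zero_pos_arr = []
--     count = 0
--
--     for i in range(n):
--         for j in range(n):
--             if mat[i][j] == 0:
--
--                 # Instead of storing the position and traversing again,
--                 # we traverse in the same iteration
--
--                 # Check for row
--                 if visited_row[i] == False:
--                     # since row is not visited mark the 1's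
--                     # in that row as -1 and inc the count
--                     for k in range(n):
--                         if mat[i][k] == 1:
--                             count += 1
--                             mat[i][k] = -1
--
--                     visited_row[i] = True
--
--                 # Check for col
--                 if visited_col[j] == False:
--                     for k in range(n):
--                         if mat[k][j] == 1:
--                             count += 1
--                             mat[k][j] = -1
--                     visited_col[j] = True
--
--     return count
-- ===== SOURCE B (Python) =====
-- def countFlip(mat):
--     # Two-phase rewrite: collect the coordinates of 1s lying in a zero-row or
--     # zero-column (read from the untouched matrix), then flip them in place.
--     n = len(mat)
--     row_zero = [any(mat[i][j] == 0 for j in range(n)) for i in range(n)]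
--     col_zero = [any(mat[i][j] == 0 for i in range(n)) for j in range(n)]
--     flips = [(i, j) for i in range(n) for j in range(n)
--              if mat[i][j] == 1 and (row_zero[i] or col_zero[j])]
--     for i, j in flips:
--         mat[i][j] = -1
--     return len(flips)
-- ===== Notes on version B (the rewrite author's own statement) =====
-- stated objective: simpler
-- what changed: B replaces A's interleaved scan with visited-row/visited-col flags and inner flip-loops fired on each zero by two flat phases: precompute which rows/columns contain a zero, list the coordinates of 1s in such rows/columns, flip them, and return the list's length.
import Mathlib
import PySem

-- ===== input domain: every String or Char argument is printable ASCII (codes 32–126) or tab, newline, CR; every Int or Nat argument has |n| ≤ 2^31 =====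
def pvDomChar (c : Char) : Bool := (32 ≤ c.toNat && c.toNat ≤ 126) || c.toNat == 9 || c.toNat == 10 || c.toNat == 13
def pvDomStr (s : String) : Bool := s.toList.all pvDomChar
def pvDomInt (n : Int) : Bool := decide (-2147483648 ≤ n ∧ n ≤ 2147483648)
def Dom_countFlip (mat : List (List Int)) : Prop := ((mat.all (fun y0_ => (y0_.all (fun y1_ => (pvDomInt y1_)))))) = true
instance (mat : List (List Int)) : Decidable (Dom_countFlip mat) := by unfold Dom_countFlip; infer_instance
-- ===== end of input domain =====

-- B replaces A's interleaved scan (visited flags + inner flip loops) by two flat phases: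
-- mark zero-rows/zero-columns, then collect-and-flip the matching 1s; objective: simpler.
-- Both Pythons mutate `mat` in place identically (1 → -1 on the counted cells); the
-- equivalence proved here is about the RETURN value.

-- ===== PORT A =====
-- mat[i][j] reads: inside Pre_ every index used is in range, so List.getD is exact there.
def pvGet2 (m : List (List Int)) (i j : Nat) : Int := (m.getD i []).getD j 0
-- mat[i][j] = v (in-range inside Pre_)
def pvSet2 (m : List (List Int)) (i j : Nat) (v : Int) : List (List Int) :=
  m.set i ((m.getD i []).set j v)

-- the inner 'for k in range(n)' row-flip loop of A
def pvFlipRow (n i : Nat) (s : Int × List (List Int)) : Int × List (List Int) :=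
  (List.range n).foldl
    (fun s k => if pvGet2 s.2 i k = 1 then (s.1 + 1, pvSet2 s.2 i k (-1)) else s) s

-- the inner 'for k in range(n)' column-flip loop of A
def pvFlipCol (n j : Nat) (s : Int × List (List Int)) : Int × List (List Int) :=
  (List.range n).foldl
    (fun s k => if pvGet2 s.2 k j = 1 then (s.1 + 1, pvSet2 s.2 k j (-1)) else s) s

-- A's body for one cell (i, j); state = (visited_row, visited_col, count, mat)
def pvStepA (n i j : Nat) (s : List Bool × List Bool × Int × List (List Int)) :
    List Bool × List Bool × Int × List (List Int) :=
  if pvGet2 s.2.2.2 i j = 0 then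
    let s1 : List Bool × Int × List (List Int) :=
      if s.1.getD i false = false then
        let r := pvFlipRow n i (s.2.2.1, s.2.2.2)
        (s.1.set i true, r.1, r.2)
      else (s.1, s.2.2.1, s.2.2.2)
    let s2 : List Bool × Int × List (List Int) :=
      if s.2.1.getD j false = false then
        let r := pvFlipCol n j (s1.2.1, s1.2.2)
        (s.2.1.set j true, r.1, r.2)
      else (s.2.1, s1.2.1, s1.2.2)
    (s1.1, s2.1, s2.2.1, s2.2.2)
  else s

def countFlip (mat : List (List Int)) : Int :=
  let n := mat.length
  ((List.range n).foldl
      (fun s i => (List.range n).foldl (fun s j => pvStepA n i j s) s)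
      (List.replicate n false, List.replicate n false, (0 : Int), mat)).2.2.1

-- ===== PORT B =====
def countFlip_alt (mat : List (List Int)) : Int :=
  let n := mat.length
  let rowZero := (List.range n).map (fun i => (List.range n).any (fun j => pvGet2 mat i j == 0))
  let colZero := (List.range n).map (fun j => (List.range n).any (fun i => pvGet2 mat i j == 0))
  let flips := (List.range n).flatMap (fun i =>
    ((List.range n).filter
        (fun j => pvGet2 mat i j == 1 && (rowZero.getD i false || colZero.getD j false))).map
      (fun j => (i, j)))
  -- the in-place flip loop: it mutates the argument only, the return value ignores it
  let _mat := flips.foldl (fun m (p : Nat × Nat) => pvSet2 m p.1 p.2 (-1)) mat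
  (flips.length : Int)

-- ===== PRECONDITION & SPEC =====
-- Pre_ = exactly the inputs where A returns: A indexes mat[i][j] for all i,j < len(mat),
-- so every row must have length ≥ len(mat); otherwise A raises IndexError.
def Pre_countFlip (mat : List (List Int)) : Prop := ∀ row ∈ mat, mat.length ≤ row.length
instance (mat : List (List Int)) : Decidable (Pre_countFlip mat) := by
  unfold Pre_countFlip; infer_instance

def pvWitness_countFlip : List (List Int) := [[1, 0, 1], [1, 1, 1], [0, 1, 1]]

def Spec_countFlip (mat : List (List Int)) (out : Int) : Prop := out = countFlip_alt mat
instance (mat : List (List Int)) (out : Int) : Decidable (Spec_countFlip mat out) := by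
  unfold Spec_countFlip; infer_instance

-- ===== CLAIM (what is proved, stated in full; the proofs are below) =====
def Claim_equal_countFlip : Prop :=
  ∀ (mat : List (List Int)), Dom_countFlip mat → Pre_countFlip mat →
    Spec_countFlip mat (countFlip mat)

-- ===== LEMMAS AND PROOFS =====

-- abstract cell predicate, "this cell is a 1 in a marked row or column"
def pvP (g : Nat → Nat → Int) (R C : Nat → Bool) (a b : Nat) : Bool := (g a b == 1) && (R a || C b)
-- abstract matrix after flipping all marked 1s
def pvM (g : Nat → Nat → Int) (R C : Nat → Bool) (a b : Nat) : Int :=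
  if pvP g R C a b then -1 else g a b
-- number of marked 1s in row a of the n×n grid
def pvRowCnt (g : Nat → Nat → Int) (R C : Nat → Bool) (n a : Nat) : Nat :=
  ((List.range n).filter (fun b => pvP g R C a b)).length
-- number of marked 1s in the whole n×n grid
def pvCnt (g : Nat → Nat → Int) (R C : Nat → Bool) (n : Nat) : Nat :=
  ((List.range n).map (fun a => pvRowCnt g R C n a)).sum
-- mark one more row/column
def pvUpd (f : Nat → Bool) (i : Nat) : Nat → Bool := fun a => if a = i then true else f a

-- row/column zero-markings after the scan has visited rows < i fully and cells (i, b), b < j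
def pvRF (g : Nat → Nat → Int) (n i j : Nat) : Nat → Bool := fun a =>
  if a < i then (List.range n).any (fun b => g a b == 0)
  else if a = i then (List.range j).any (fun b => g a b == 0)
  else false
def pvCF (g : Nat → Nat → Int) (n i j : Nat) : Nat → Bool := fun b =>
  decide (b < n) && ((List.range i).any (fun a => g a b == 0) || (decide (b < j) && (g i b == 0)))

-- the concrete mutated matrix realises pvM
def pvMatOK (mat m : List (List Int)) (R C : Nat → Bool) : Prop :=
  m.length = mat.length ∧ (∀ a, (m.getD a []).length = (mat.getD a []).length) ∧
  ∀ a b, a < mat.length → b < mat.length → pvGet2 m a b = pvM (pvGet2 mat) R C a b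

-- full loop invariant for A's state (visited_row, visited_col, count, mat)
def pvInv (mat : List (List Int)) (R C : Nat → Bool)
    (s : List Bool × List Bool × Int × List (List Int)) : Prop :=
  s.1.length = mat.length ∧ (∀ a, s.1.getD a false = R a) ∧
  s.2.1.length = mat.length ∧ (∀ b, s.2.1.getD b false = C b) ∧
  s.2.2.1 = (pvCnt (pvGet2 mat) R C mat.length : Int) ∧
  pvMatOK mat s.2.2.2 R C

theorem pvGet2_set2 (m : List (List Int)) (a b : Nat) (v : Int)
    (ha : a < m.length) (hb : b < (m.getD a []).length) (x y : Nat) :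
    pvGet2 (pvSet2 m a b v) x y = if x = a ∧ y = b then v else pvGet2 m x y := by
  have hb' : b < m[a].length := by rwa [List.getD_eq_getElem _ _ ha] at hb
  by_cases hx : x = a
  · subst hx
    by_cases hy : y = b
    · subst hy
      simp [pvGet2, pvSet2, List.getD_eq_getElem?_getD, ha, hb']
    · simp [pvGet2, pvSet2, List.getD_eq_getElem?_getD, ha, hy, Ne.symm hy]
  · simp [pvGet2, pvSet2, List.getD_eq_getElem?_getD, hx, Ne.symm hx]

theorem pvSet2_length (m : List (List Int)) (a b : Nat) (v : Int) :
    (pvSet2 m a b v).length = m.length := by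
  simp [pvSet2]

theorem pvSet2_row_length (m : List (List Int)) (a b : Nat) (v : Int) (x : Nat) :
    ((pvSet2 m a b v).getD x []).length = (m.getD x []).length := by
  by_cases hx : x = a
  · subst hx
    by_cases ha : x < m.length
    · simp [pvSet2, List.getD_eq_getElem?_getD, ha]
    · simp [pvSet2, List.getD_eq_getElem?_getD, ha]
  · simp [pvSet2, List.getD_eq_getElem?_getD, Ne.symm hx]

theorem getD_set_bool (l : List Bool) (i a : Nat) (v : Bool) (hi : i < l.length) :
    (l.set i v).getD a false = if a = i then v else l.getD a false := by
  by_cases ha : a = i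
  · subst ha
    simp [List.getD_eq_getElem?_getD, hi]
  · simp [List.getD_eq_getElem?_getD, Ne.symm ha, ha]

theorem pvM_eq_zero (g : Nat → Nat → Int) (R C : Nat → Bool) (a b : Nat) :
    (pvM g R C a b = 0) ↔ (g a b = 0) := by
  unfold pvM pvP
  by_cases h1 : g a b = 1
  · by_cases h2 : R a <;> by_cases h3 : C b <;> simp [h1, h2, h3]
  · simp [h1]

theorem pvM_eq_one (g : Nat → Nat → Int) (R C : Nat → Bool) (a b : Nat) :
    (pvM g R C a b = 1) ↔ (g a b = 1 ∧ R a = false ∧ C b = false) := by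
  unfold pvM pvP
  by_cases h1 : g a b = 1
  · by_cases h2 : R a <;> by_cases h3 : C b <;> simp [h1, h2, h3]
  · simp [h1]

theorem pvM_updR_eq (g : Nat → Nat → Int) (R C : Nat → Bool) (i b : Nat)
    (h : ¬(g i b = 1 ∧ C b = false)) : pvM g (pvUpd R i) C i b = pvM g R C i b := by
  unfold pvM pvP pvUpd
  by_cases h1 : g i b = 1
  · have h3 : C b = true := by rcases Bool.eq_false_or_eq_true (C b) with h' | h' <;> tauto
    simp [h1, h3]
  · simp [h1]

theorem pvM_updC_eq (g : Nat → Nat → Int) (R C : Nat → Bool) (j a : Nat)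
    (h : ¬(g a j = 1 ∧ R a = false)) : pvM g R (pvUpd C j) a j = pvM g R C a j := by
  unfold pvM pvP pvUpd
  by_cases h1 : g a j = 1
  · have h3 : R a = true := by rcases Bool.eq_false_or_eq_true (R a) with h' | h' <;> tauto
    simp [h1, h3]
  · simp [h1]

theorem pvM_updR_ne (g : Nat → Nat → Int) (R C : Nat → Bool) (i x y : Nat) (hx : x ≠ i) :
    pvM g (pvUpd R i) C x y = pvM g R C x y := by
  simp [pvM, pvP, pvUpd, hx]

theorem pvM_updC_ne (g : Nat → Nat → Int) (R C : Nat → Bool) (j x y : Nat) (hy : y ≠ j) :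
    pvM g R (pvUpd C j) x y = pvM g R C x y := by
  simp [pvM, pvP, pvUpd, hy]

theorem countP_split (l : List Nat) (p q : Nat → Bool) :
    l.countP p = l.countP (fun x => p x && q x) + l.countP (fun x => p x && !q x) := by
  induction l with
  | nil => simp
  | cons x t ih =>
    by_cases hp : p x <;> by_cases hq : q x <;>
      simp [hp, hq, ih] <;> omega

theorem countP_update (n j : Nat) (p p' : Nat → Bool) (hj : j < n)
    (h : ∀ b, b ≠ j → p' b = p b) :
    (List.range n).countP p' + (if p j then 1 else 0)
      = (List.range n).countP p + (if p' j then 1 else 0) := by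
  induction n with
  | zero => omega
  | succ m ih =>
    rw [List.range_succ, List.countP_append, List.countP_append]
    by_cases hjm : j = m
    · subst hjm
      have hpre : (List.range j).countP p' = (List.range j).countP p := by
        apply List.countP_congr
        intro b hb
        have hbj : b ≠ j := by have := List.mem_range.1 hb; omega
        rw [h b hbj]
      rw [hpre]
      by_cases hp : p j <;> by_cases hp' : p' j <;> simp [hp, hp'] <;> omega
    · have hj' : j < m := by omega
      have hm : p' m = p m := h m (by omega)
      have := ih hj'
      by_cases hp : p m <;> simp [hp, hm] <;> omega

theorem sum_map_update (n i : Nat) (f f' : Nat → Nat) (d : Nat) (hi : i < n)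
    (hne : ∀ a, a ≠ i → f' a = f a) (heq : f' i = f i + d) :
    ((List.range n).map f').sum = ((List.range n).map f).sum + d := by
  induction n with
  | zero => omega
  | succ m ih =>
    rw [List.range_succ, List.map_append, List.map_append, List.sum_append, List.sum_append]
    by_cases him : i = m
    · subst him
      have hpre : (List.range i).map f' = (List.range i).map f := by
        apply List.map_congr_left
        intro a ha
        exact hne a (by have := List.mem_range.1 ha; omega)
      rw [hpre]
      simp [heq]; omega
    · have hi' : i < m := by omega
      rw [ih hi']
      simp [hne m (by omega)]; omega

-- (Nat-valued twins of the Int-valued PySem sum lemmas, needed at type Nat)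
theorem sum_map_add_pointwise (l : List Nat) (f f' e : Nat → Nat)
    (h : ∀ a ∈ l, f' a = f a + e a) :
    (l.map f').sum = (l.map f).sum + (l.map e).sum := by
  induction l with
  | nil => simp
  | cons x t ih =>
    simp only [List.map_cons, List.sum_cons]
    rw [h x (by simp), ih (fun a ha => h a (by simp [ha]))]
    omega

theorem sum_map_indicator (l : List Nat) (p : Nat → Bool) :
    (l.map (fun a => if p a then 1 else 0)).sum = l.countP p := by
  induction l with
  | nil => simp
  | cons x t ih => by_cases hp : p x <;> simp [hp, ih] <;> omega

theorem pvCnt_updR (g : Nat → Nat → Int) (R C : Nat → Bool) (n i : Nat) (hi : i < n)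
    (hR : R i = false) :
    pvCnt g (pvUpd R i) C n
      = pvCnt g R C n + (List.range n).countP (fun k => g i k == 1 && !(C k)) := by
  unfold pvCnt
  refine sum_map_update n i _ _ _ hi ?_ ?_
  · intro a ha
    unfold pvRowCnt
    congr 1
    apply List.filter_congr
    intro b _
    simp [pvP, pvUpd, ha]
  · unfold pvRowCnt
    rw [← List.countP_eq_length_filter, ← List.countP_eq_length_filter]
    have h1 : (List.range n).countP (fun b => pvP g (pvUpd R i) C i b)
        = (List.range n).countP (fun b => g i b == 1) := by
      apply List.countP_congr; intro b _; simp [pvP, pvUpd]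
    have h2 : (List.range n).countP (fun b => pvP g R C i b)
        = (List.range n).countP (fun b => (g i b == 1) && C b) := by
      apply List.countP_congr; intro b _; simp [pvP, hR]
    rw [h1, h2, countP_split (List.range n) (fun b => g i b == 1) C]

theorem pvCnt_updC (g : Nat → Nat → Int) (R C : Nat → Bool) (n j : Nat) (hj : j < n)
    (hC : C j = false) :
    pvCnt g R (pvUpd C j) n
      = pvCnt g R C n + (List.range n).countP (fun a => g a j == 1 && !(R a)) := by
  unfold pvCnt
  have key : ∀ a, pvRowCnt g R (pvUpd C j) n a
      = pvRowCnt g R C n a + (if (g a j == 1 && !(R a)) then 1 else 0) := by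
    intro a
    unfold pvRowCnt
    rw [← List.countP_eq_length_filter, ← List.countP_eq_length_filter]
    have h := countP_update n j (fun b => pvP g R C a b) (fun b => pvP g R (pvUpd C j) a b) hj
      (by intro b hb; simp [pvP, pvUpd, hb])
    by_cases h1 : g a j = 1 <;> by_cases h2 : R a <;>
      simp [pvP, pvUpd, hC, h1, h2] at h ⊢ <;> omega
  rw [sum_map_add_pointwise _ _ _ _ (fun a _ => key a), sum_map_indicator]

-- one pass of A's inner row-flip loop, cut off after the first t columns
theorem pvFlipRow_aux (mat m : List (List Int)) (R C : Nat → Bool) (i : Nat) (cnt : Int)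
    (hL : ∀ a < mat.length, mat.length ≤ (mat.getD a []).length)
    (hm : pvMatOK mat m R C) (hi : i < mat.length) (hR : R i = false) :
    ∀ t, t ≤ mat.length →
      (((List.range t).foldl
          (fun s k => if pvGet2 s.2 i k = 1 then (s.1 + 1, pvSet2 s.2 i k (-1)) else s)
          (cnt, m)).1
        = cnt + ((List.range t).countP (fun k => pvGet2 mat i k == 1 && !(C k)) : Nat)) ∧
      (((List.range t).foldl
          (fun s k => if pvGet2 s.2 i k = 1 then (s.1 + 1, pvSet2 s.2 i k (-1)) else s)
          (cnt, m)).2.length = mat.length) ∧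
      (∀ a, ((((List.range t).foldl
          (fun s k => if pvGet2 s.2 i k = 1 then (s.1 + 1, pvSet2 s.2 i k (-1)) else s)
          (cnt, m)).2).getD a []).length = (mat.getD a []).length) ∧
      (∀ x y, x < mat.length → y < mat.length →
        pvGet2 ((List.range t).foldl
            (fun s k => if pvGet2 s.2 i k = 1 then (s.1 + 1, pvSet2 s.2 i k (-1)) else s)
            (cnt, m)).2 x y
          = if x = i ∧ y < t then pvM (pvGet2 mat) (pvUpd R i) C x y
            else pvM (pvGet2 mat) R C x y) := by
  intro t
  induction t with
  | zero =>
    intro _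
    refine ⟨by simp, by simpa using hm.1, by simpa using hm.2.1, ?_⟩
    intro x y hx hy
    simpa using hm.2.2 x y hx hy
  | succ t ih =>
    intro ht
    obtain ⟨h1, h2, h3, h4⟩ := ih (by omega)
    have htn : t < mat.length := by omega
    set st := (List.range t).foldl
      (fun s k => if pvGet2 s.2 i k = 1 then (s.1 + 1, pvSet2 s.2 i k (-1)) else s)
      (cnt, m) with hst
    have hstep : (List.range (t+1)).foldl
        (fun s k => if pvGet2 s.2 i k = 1 then (s.1 + 1, pvSet2 s.2 i k (-1)) else s)
        (cnt, m)
        = if pvGet2 st.2 i t = 1 then (st.1 + 1, pvSet2 st.2 i t (-1)) else st := by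
      rw [List.range_succ, List.foldl_append]
      simp [hst]
    have hval : pvGet2 st.2 i t = pvM (pvGet2 mat) R C i t := by
      have := h4 i t hi htn
      simpa using this
    have hcond : (pvGet2 st.2 i t = 1) ↔ (pvGet2 mat i t = 1 ∧ C t = false) := by
      rw [hval, pvM_eq_one]
      constructor
      · rintro ⟨u, _, w⟩; exact ⟨u, w⟩
      · rintro ⟨u, w⟩; exact ⟨u, hR, w⟩
    have hcnt : ((List.range (t+1)).countP (fun k => pvGet2 mat i k == 1 && !(C k)) : Nat)
        = ((List.range t).countP (fun k => pvGet2 mat i k == 1 && !(C k)) : Nat)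
          + (if pvGet2 mat i t = 1 ∧ C t = false then 1 else 0) := by
      rw [List.range_succ, List.countP_append]
      by_cases hgt : pvGet2 mat i t = 1 <;> by_cases hct : C t <;>
        simp [hgt, hct]
    by_cases hq : pvGet2 mat i t = 1 ∧ C t = false
    · have hcond' : pvGet2 st.2 i t = 1 := hcond.2 hq
      rw [hstep, if_pos hcond']
      have hbi : i < st.2.length := by rw [h2]; exact hi
      have hbt : t < (st.2.getD i []).length := by rw [h3]; exact lt_of_lt_of_le htn (hL i hi)
      refine ⟨?_, ?_, ?_, ?_⟩
      · simp only [hcnt, if_pos hq, h1]; push_cast; ring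
      · rw [pvSet2_length, h2]
      · intro a; rw [pvSet2_row_length, h3]
      · intro x y hx hy
        rw [pvGet2_set2 st.2 i t (-1) hbi hbt x y]
        by_cases hxi : x = i
        · by_cases hyt : y = t
          · rw [if_pos ⟨hxi, hyt⟩, if_pos ⟨hxi, by omega⟩, hxi, hyt]
            unfold pvM pvP pvUpd
            simp [hq.1]
          · rw [if_neg (by omega), h4 x y hx hy]
            by_cases hylt : y < t
            · rw [if_pos ⟨hxi, hylt⟩, if_pos ⟨hxi, by omega⟩]
            · rw [if_neg (by omega), if_neg (by omega)]
        · rw [if_neg (by omega), h4 x y hx hy, if_neg (by omega), if_neg (by omega)]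
    · have hcond' : ¬ (pvGet2 st.2 i t = 1) := fun hv => hq (hcond.1 hv)
      rw [hstep, if_neg hcond']
      refine ⟨?_, h2, h3, ?_⟩
      · simp only [hcnt, if_neg hq, h1]; push_cast; ring
      · intro x y hx hy
        rw [h4 x y hx hy]
        by_cases hxi : x = i
        · by_cases hyt : y = t
          · rw [if_neg (by omega), if_pos ⟨hxi, by omega⟩, hxi, hyt,
              pvM_updR_eq _ _ _ _ _ hq]
          · by_cases hylt : y < t
            · rw [if_pos ⟨hxi, hylt⟩, if_pos ⟨hxi, by omega⟩]
            · rw [if_neg (by omega), if_neg (by omega)]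
        · rw [if_neg (by omega), if_neg (by omega)]

theorem pvFlipRow_spec (mat m : List (List Int)) (R C : Nat → Bool) (i : Nat) (cnt : Int)
    (hL : ∀ a < mat.length, mat.length ≤ (mat.getD a []).length)
    (hm : pvMatOK mat m R C) (hi : i < mat.length) (hR : R i = false) :
    (pvFlipRow mat.length i (cnt, m)).1
        = cnt + ((List.range mat.length).countP
            (fun k => pvGet2 mat i k == 1 && !(C k)) : Nat) ∧
    pvMatOK mat (pvFlipRow mat.length i (cnt, m)).2 (pvUpd R i) C := by
  obtain ⟨h1, h2, h3, h4⟩ := pvFlipRow_aux mat m R C i cnt hL hm hi hR mat.length le_rfl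
  unfold pvFlipRow
  refine ⟨h1, h2, h3, ?_⟩
  intro x y hx hy
  rw [h4 x y hx hy]
  by_cases hxi : x = i
  · rw [if_pos ⟨hxi, hy⟩]
  · rw [if_neg (by omega), pvM_updR_ne _ _ _ _ _ _ hxi]

-- one pass of A's inner column-flip loop, cut off after the first t rows
theorem pvFlipCol_aux (mat m : List (List Int)) (R C : Nat → Bool) (j : Nat) (cnt : Int)
    (hL : ∀ a < mat.length, mat.length ≤ (mat.getD a []).length)
    (hm : pvMatOK mat m R C) (hj : j < mat.length) (hC : C j = false) :
    ∀ t, t ≤ mat.length →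
      (((List.range t).foldl
          (fun s k => if pvGet2 s.2 k j = 1 then (s.1 + 1, pvSet2 s.2 k j (-1)) else s)
          (cnt, m)).1
        = cnt + ((List.range t).countP (fun a => pvGet2 mat a j == 1 && !(R a)) : Nat)) ∧
      (((List.range t).foldl
          (fun s k => if pvGet2 s.2 k j = 1 then (s.1 + 1, pvSet2 s.2 k j (-1)) else s)
          (cnt, m)).2.length = mat.length) ∧
      (∀ a, ((((List.range t).foldl
          (fun s k => if pvGet2 s.2 k j = 1 then (s.1 + 1, pvSet2 s.2 k j (-1)) else s)
          (cnt, m)).2).getD a []).length = (mat.getD a []).length) ∧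
      (∀ x y, x < mat.length → y < mat.length →
        pvGet2 ((List.range t).foldl
            (fun s k => if pvGet2 s.2 k j = 1 then (s.1 + 1, pvSet2 s.2 k j (-1)) else s)
            (cnt, m)).2 x y
          = if y = j ∧ x < t then pvM (pvGet2 mat) R (pvUpd C j) x y
            else pvM (pvGet2 mat) R C x y) := by
  intro t
  induction t with
  | zero =>
    intro _
    refine ⟨by simp, by simpa using hm.1, by simpa using hm.2.1, ?_⟩
    intro x y hx hy
    simpa using hm.2.2 x y hx hy
  | succ t ih =>
    intro ht
    obtain ⟨h1, h2, h3, h4⟩ := ih (by omega)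
    have htn : t < mat.length := by omega
    set st := (List.range t).foldl
      (fun s k => if pvGet2 s.2 k j = 1 then (s.1 + 1, pvSet2 s.2 k j (-1)) else s)
      (cnt, m) with hst
    have hstep : (List.range (t+1)).foldl
        (fun s k => if pvGet2 s.2 k j = 1 then (s.1 + 1, pvSet2 s.2 k j (-1)) else s)
        (cnt, m)
        = if pvGet2 st.2 t j = 1 then (st.1 + 1, pvSet2 st.2 t j (-1)) else st := by
      rw [List.range_succ, List.foldl_append]
      simp [hst]
    have hval : pvGet2 st.2 t j = pvM (pvGet2 mat) R C t j := by
      have := h4 t j htn hj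
      simpa using this
    have hcond : (pvGet2 st.2 t j = 1) ↔ (pvGet2 mat t j = 1 ∧ R t = false) := by
      rw [hval, pvM_eq_one]
      constructor
      · rintro ⟨u, w, _⟩; exact ⟨u, w⟩
      · rintro ⟨u, w⟩; exact ⟨u, w, hC⟩
    have hcnt : ((List.range (t+1)).countP (fun a => pvGet2 mat a j == 1 && !(R a)) : Nat)
        = ((List.range t).countP (fun a => pvGet2 mat a j == 1 && !(R a)) : Nat)
          + (if pvGet2 mat t j = 1 ∧ R t = false then 1 else 0) := by
      rw [List.range_succ, List.countP_append]
      by_cases hgt : pvGet2 mat t j = 1 <;> by_cases hrt : R t <;>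
        simp [hgt, hrt]
    by_cases hq : pvGet2 mat t j = 1 ∧ R t = false
    · have hcond' : pvGet2 st.2 t j = 1 := hcond.2 hq
      rw [hstep, if_pos hcond']
      have hbt : t < st.2.length := by rw [h2]; exact htn
      have hbj : j < (st.2.getD t []).length := by rw [h3]; exact lt_of_lt_of_le hj (hL t htn)
      refine ⟨?_, ?_, ?_, ?_⟩
      · simp only [hcnt, if_pos hq, h1]; push_cast; ring
      · rw [pvSet2_length, h2]
      · intro a; rw [pvSet2_row_length, h3]
      · intro x y hx hy
        rw [pvGet2_set2 st.2 t j (-1) hbt hbj x y]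
        by_cases hyj : y = j
        · by_cases hxt : x = t
          · rw [if_pos ⟨hxt, hyj⟩, if_pos ⟨hyj, by omega⟩, hxt, hyj]
            unfold pvM pvP pvUpd
            simp [hq.1]
          · rw [if_neg (by omega), h4 x y hx hy]
            by_cases hxlt : x < t
            · rw [if_pos ⟨hyj, hxlt⟩, if_pos ⟨hyj, by omega⟩]
            · rw [if_neg (by omega), if_neg (by omega)]
        · rw [if_neg (by omega), h4 x y hx hy, if_neg (by omega), if_neg (by omega)]
    · have hcond' : ¬ (pvGet2 st.2 t j = 1) := fun hv => hq (hcond.1 hv)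
      rw [hstep, if_neg hcond']
      refine ⟨?_, h2, h3, ?_⟩
      · simp only [hcnt, if_neg hq, h1]; push_cast; ring
      · intro x y hx hy
        rw [h4 x y hx hy]
        by_cases hyj : y = j
        · by_cases hxt : x = t
          · rw [if_neg (by omega), if_pos ⟨hyj, by omega⟩, hxt, hyj,
              pvM_updC_eq _ _ _ _ _ hq]
          · by_cases hxlt : x < t
            · rw [if_pos ⟨hyj, hxlt⟩, if_pos ⟨hyj, by omega⟩]
            · rw [if_neg (by omega), if_neg (by omega)]
        · rw [if_neg (by omega), if_neg (by omega)]

theorem pvFlipCol_spec (mat m : List (List Int)) (R C : Nat → Bool) (j : Nat) (cnt : Int)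
    (hL : ∀ a < mat.length, mat.length ≤ (mat.getD a []).length)
    (hm : pvMatOK mat m R C) (hj : j < mat.length) (hC : C j = false) :
    (pvFlipCol mat.length j (cnt, m)).1
        = cnt + ((List.range mat.length).countP
            (fun a => pvGet2 mat a j == 1 && !(R a)) : Nat) ∧
    pvMatOK mat (pvFlipCol mat.length j (cnt, m)).2 R (pvUpd C j) := by
  obtain ⟨h1, h2, h3, h4⟩ := pvFlipCol_aux mat m R C j cnt hL hm hj hC mat.length le_rfl
  unfold pvFlipCol
  refine ⟨h1, h2, h3, ?_⟩
  intro x y hx hy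
  rw [h4 x y hx hy]
  by_cases hyj : y = j
  · rw [if_pos ⟨hyj, hx⟩]
  · rw [if_neg (by omega), pvM_updC_ne _ _ _ _ _ _ hyj]

theorem pvStepA_spec (mat : List (List Int)) (R C : Nat → Bool)
    (s : List Bool × List Bool × Int × List (List Int)) (i j : Nat)
    (hL : ∀ a < mat.length, mat.length ≤ (mat.getD a []).length)
    (hi : i < mat.length) (hj : j < mat.length) (hInv : pvInv mat R C s) :
    pvInv mat (if pvGet2 mat i j = 0 then pvUpd R i else R)
      (if pvGet2 mat i j = 0 then pvUpd C j else C) (pvStepA mat.length i j s) := by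
  obtain ⟨hvr, hvrv, hvc, hvcv, hcnt, hmOK⟩ := hInv
  have hcell : pvGet2 s.2.2.2 i j = pvM (pvGet2 mat) R C i j := hmOK.2.2 i j hi hj
  by_cases hz : pvGet2 mat i j = 0
  · have hz' : pvGet2 s.2.2.2 i j = 0 := by rw [hcell, pvM_eq_zero]; exact hz
    rw [if_pos hz, if_pos hz]
    by_cases hri : s.1.getD i false = false
    · have hRi : R i = false := by rw [← hvrv i]; exact hri
      obtain ⟨hc1, hm1⟩ := pvFlipRow_spec mat s.2.2.2 R C i s.2.2.1 hL hmOK hi hRi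
      have hvrv1 : ∀ a, (s.1.set i true).getD a false = pvUpd R i a := by
        intro a
        rw [getD_set_bool s.1 i a true (by rw [hvr]; exact hi), hvrv a]
        rfl
      have hcnt1 : (pvFlipRow mat.length i (s.2.2.1, s.2.2.2)).1
          = (pvCnt (pvGet2 mat) (pvUpd R i) C mat.length : Int) := by
        rw [hc1, hcnt, pvCnt_updR (pvGet2 mat) R C mat.length i hi hRi]
        push_cast; ring
      by_cases hcj : s.2.1.getD j false = false
      · have hCj : C j = false := by rw [← hvcv j]; exact hcj
        obtain ⟨hc2, hm2⟩ := pvFlipCol_spec mat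
          (pvFlipRow mat.length i (s.2.2.1, s.2.2.2)).2 (pvUpd R i) C j
          (pvFlipRow mat.length i (s.2.2.1, s.2.2.2)).1 hL hm1 hj hCj
        have hvcv2 : ∀ b, (s.2.1.set j true).getD b false = pvUpd C j b := by
          intro b
          rw [getD_set_bool s.2.1 j b true (by rw [hvc]; exact hj), hvcv b]
          rfl
        simp only [pvStepA, if_pos hz', if_pos hri, if_pos hcj, Prod.mk.eta]
        refine ⟨by simp [hvr], hvrv1, by simp [hvc], hvcv2, ?_, hm2⟩
        rw [hc2, hcnt1, pvCnt_updC (pvGet2 mat) (pvUpd R i) C mat.length j hj hCj]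
        push_cast; ring
      · have hCj : C j = true := by
          rw [← hvcv j]; revert hcj; cases s.2.1.getD j false <;> simp
        have hupdC : pvUpd C j = C := by
          funext b
          unfold pvUpd
          by_cases hb : b = j
          · rw [if_pos hb, hb, hCj]
          · rw [if_neg hb]
        simp only [pvStepA, if_pos hz', if_pos hri, if_neg hcj, Prod.mk.eta]
        rw [hupdC]
        exact ⟨by simp [hvr], hvrv1, hvc, hvcv, hcnt1, hm1⟩
    · have hRi : R i = true := by
        rw [← hvrv i]; revert hri; cases s.1.getD i false <;> simp
      have hupdR : pvUpd R i = R := by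
        funext a
        unfold pvUpd
        by_cases ha : a = i
        · rw [if_pos ha, ha, hRi]
        · rw [if_neg ha]
      by_cases hcj : s.2.1.getD j false = false
      · have hCj : C j = false := by rw [← hvcv j]; exact hcj
        obtain ⟨hc2, hm2⟩ := pvFlipCol_spec mat s.2.2.2 R C j s.2.2.1 hL hmOK hj hCj
        have hvcv2 : ∀ b, (s.2.1.set j true).getD b false = pvUpd C j b := by
          intro b
          rw [getD_set_bool s.2.1 j b true (by rw [hvc]; exact hj), hvcv b]
          rfl
        simp only [pvStepA, if_pos hz', if_neg hri, if_pos hcj, Prod.mk.eta]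
        rw [hupdR]
        refine ⟨hvr, hvrv, by simp [hvc], hvcv2, ?_, hm2⟩
        rw [hc2, hcnt, pvCnt_updC (pvGet2 mat) R C mat.length j hj hCj]
        push_cast; ring
      · have hCj : C j = true := by
          rw [← hvcv j]; revert hcj; cases s.2.1.getD j false <;> simp
        have hupdC : pvUpd C j = C := by
          funext b
          unfold pvUpd
          by_cases hb : b = j
          · rw [if_pos hb, hb, hCj]
          · rw [if_neg hb]
        simp only [pvStepA, if_pos hz', if_neg hri, if_neg hcj, Prod.mk.eta]
        rw [hupdR, hupdC]
        exact ⟨hvr, hvrv, hvc, hvcv, hcnt, hmOK⟩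
  · have hz' : ¬ pvGet2 s.2.2.2 i j = 0 := by rw [hcell, pvM_eq_zero]; exact hz
    rw [if_neg hz, if_neg hz]
    unfold pvStepA
    rw [if_neg hz']
    exact ⟨hvr, hvrv, hvc, hvcv, hcnt, hmOK⟩

theorem pvRF_succ (g : Nat → Nat → Int) (n i j : Nat) :
    pvRF g n i (j + 1) = if g i j = 0 then pvUpd (pvRF g n i j) i else pvRF g n i j := by
  by_cases hz : g i j = 0
  · rw [if_pos hz]
    funext a
    unfold pvRF pvUpd
    by_cases h1 : a = i
    · subst h1
      simp [List.range_succ, List.any_append, hz]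
    · simp [h1]
  · rw [if_neg hz]
    funext a
    unfold pvRF
    by_cases h1 : a = i
    · subst h1
      have hzf : (g a j == 0) = false := by simpa using hz
      simp [List.range_succ, List.any_append, hzf]
    · simp [h1]

theorem pvCF_succ (g : Nat → Nat → Int) (n i j : Nat) (hj : j < n) :
    pvCF g n i (j + 1) = if g i j = 0 then pvUpd (pvCF g n i j) j else pvCF g n i j := by
  by_cases hz : g i j = 0
  · rw [if_pos hz]
    funext b
    unfold pvCF pvUpd
    by_cases h1 : b = j
    · subst h1
      simp [hz, hj]
    · have hle : (b ≤ j) ↔ (b < j) := by omega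
      simp [h1, hle]
  · rw [if_neg hz]
    funext b
    unfold pvCF
    by_cases h1 : b = j
    · subst h1
      have hzf : (g i b == 0) = false := by simpa using hz
      simp [hzf]
    · have hle : (b ≤ j) ↔ (b < j) := by omega
      simp [h1, hle]

theorem pvRF_roll (g : Nat → Nat → Int) (n i : Nat) :
    pvRF g n (i + 1) 0 = pvRF g n i n := by
  funext a
  unfold pvRF
  by_cases h1 : a < i
  · simp [h1, show a < i + 1 from by omega]
  · by_cases h2 : a = i
    · subst h2
      simp [show a < a + 1 from by omega]
    · have h3 : ¬ a < i + 1 := by omega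
      by_cases h4 : a = i + 1 <;> simp [h1, h2, h3, h4]

theorem pvCF_roll (g : Nat → Nat → Int) (n i : Nat) :
    pvCF g n (i + 1) 0 = pvCF g n i n := by
  funext b
  unfold pvCF
  by_cases hb : b < n
  · simp [hb, List.range_succ, List.any_append]
  · simp [hb]

theorem pvInner (mat : List (List Int))
    (hL : ∀ a < mat.length, mat.length ≤ (mat.getD a []).length)
    (i : Nat) (hi : i < mat.length)
    (s : List Bool × List Bool × Int × List (List Int))
    (h : pvInv mat (pvRF (pvGet2 mat) mat.length i 0) (pvCF (pvGet2 mat) mat.length i 0) s) :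
    ∀ j0, j0 ≤ mat.length →
      pvInv mat (pvRF (pvGet2 mat) mat.length i j0) (pvCF (pvGet2 mat) mat.length i j0)
        ((List.range j0).foldl (fun s j => pvStepA mat.length i j s) s) := by
  intro j0
  induction j0 with
  | zero => intro _; simpa using h
  | succ j ih =>
    intro hj
    have hjn : j < mat.length := by omega
    rw [List.range_succ, List.foldl_append]
    have hstep := pvStepA_spec mat (pvRF (pvGet2 mat) mat.length i j)
      (pvCF (pvGet2 mat) mat.length i j)
      ((List.range j).foldl (fun s j => pvStepA mat.length i j s) s) i j hL hi hjn
      (ih (by omega))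
    rw [pvRF_succ (pvGet2 mat) mat.length i j, pvCF_succ (pvGet2 mat) mat.length i j hjn]
    simpa using hstep

theorem pvInit (mat : List (List Int)) :
    pvInv mat (pvRF (pvGet2 mat) mat.length 0 0) (pvCF (pvGet2 mat) mat.length 0 0)
      (List.replicate mat.length false, List.replicate mat.length false, (0 : Int), mat) := by
  have hRF : ∀ a, pvRF (pvGet2 mat) mat.length 0 0 a = false := by
    intro a; unfold pvRF; by_cases h : a = 0 <;> simp [h]
  have hCF : ∀ b, pvCF (pvGet2 mat) mat.length 0 0 b = false := by
    intro b; unfold pvCF; simp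
  have hP : ∀ a b, pvP (pvGet2 mat) (pvRF (pvGet2 mat) mat.length 0 0)
      (pvCF (pvGet2 mat) mat.length 0 0) a b = false := by
    intro a b; unfold pvP; rw [hRF, hCF]; simp
  have hgetDrep : ∀ a : Nat, (List.replicate mat.length false).getD a false = false := by
    intro a
    by_cases ha : a < mat.length
    · exact List.getD_replicate false ha
    · simp [List.getD_eq_getElem?_getD, List.getElem?_eq_none, not_lt.1 ha]
  refine ⟨by simp, fun a => by rw [hgetDrep, hRF], by simp, fun b => by rw [hgetDrep, hCF],
    ?_, rfl, fun a => rfl, ?_⟩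
  · have hz : pvCnt (pvGet2 mat) (pvRF (pvGet2 mat) mat.length 0 0)
        (pvCF (pvGet2 mat) mat.length 0 0) mat.length = 0 := by
      unfold pvCnt pvRowCnt
      have hfil : ∀ a : Nat, (List.range mat.length).filter
          (fun b => pvP (pvGet2 mat) (pvRF (pvGet2 mat) mat.length 0 0)
            (pvCF (pvGet2 mat) mat.length 0 0) a b) = [] := by
        intro a
        apply List.filter_eq_nil_iff.2
        intro b _
        simp [hP a b]
      simp [hfil]
    rw [hz]
    rfl
  · intro a b _ _
    unfold pvM
    rw [hP]
    simp

theorem pvOuter (mat : List (List Int))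
    (hL : ∀ a < mat.length, mat.length ≤ (mat.getD a []).length) :
    ∀ i0, i0 ≤ mat.length →
      pvInv mat (pvRF (pvGet2 mat) mat.length i0 0) (pvCF (pvGet2 mat) mat.length i0 0)
        ((List.range i0).foldl
          (fun s i => (List.range mat.length).foldl (fun s j => pvStepA mat.length i j s) s)
          (List.replicate mat.length false, List.replicate mat.length false, (0 : Int), mat)) := by
  intro i0
  induction i0 with
  | zero => intro _; simpa using pvInit mat
  | succ i ih =>
    intro hi
    have hin : i < mat.length := by omega
    rw [List.range_succ, List.foldl_append]
    have hinner := pvInner mat hL i hin _ (ih (by omega)) mat.length le_rfl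
    rw [pvRF_roll (pvGet2 mat) mat.length i, pvCF_roll (pvGet2 mat) mat.length i]
    simpa using hinner

theorem countFlip_alt_eq (mat : List (List Int)) :
    countFlip_alt mat
      = (pvCnt (pvGet2 mat) (pvRF (pvGet2 mat) mat.length mat.length 0)
          (pvCF (pvGet2 mat) mat.length mat.length 0) mat.length : Int) := by
  simp only [countFlip_alt]
  rw [List.length_flatMap]
  congr 1
  unfold pvCnt
  apply congrArg
  apply List.map_congr_left
  intro i hi
  have hiln : i < mat.length := List.mem_range.1 hi
  rw [List.length_map]
  unfold pvRowCnt
  congr 1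
  apply List.filter_congr
  intro j hj
  have hjln : j < mat.length := List.mem_range.1 hj
  rw [PySem.List.getD_map_range _ _ _ _ hiln, PySem.List.getD_map_range _ _ _ _ hjln]
  unfold pvP pvRF pvCF
  simp [hiln, hjln]

-- ===== VERDICT (by name: the statement is the Claim_ definition above) =====
theorem countFlip_spec : Claim_equal_countFlip := by
  intro mat _hdom hpre
  unfold Spec_countFlip
  have hL : ∀ a < mat.length, mat.length ≤ (mat.getD a []).length := by
    intro a ha
    have hmem : mat.getD a [] ∈ mat := by
      rw [List.getD_eq_getElem _ _ ha]; exact List.getElem_mem ha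
    exact hpre _ hmem
  have h := pvOuter mat hL mat.length le_rfl
  rw [countFlip_alt_eq]
  simpa [countFlip] using h.2.2.2.2.1
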